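-- pv_equiv track=rewrite | github.com/michaelfromyeg/aoc25 | day06/main.py | part1
-- ===== SOURCE A (Python) =====
-- from functools import reduce
--
-- def part1(parts: list[list[int]], ops: list[str]) -> int:
--     """Calculate result based on operations applied to transposed parts."""
--     # Transpose the parts
--     parts = [list(row) for row in zip(*parts)]
--
--     total = 0
--     for i, part in enumerate(parts):
--         if ops[i] == "+":
--             total += sum(part)
--         else:
--             total += reduce(lambda x, y: x * y, part)
--     return total
-- ===== SOURCE B (Python) =====
-- def part1(parts: list[list[int]], ops: list[str]) -> int:
--     """Calculate result based on operations applied to transposed parts."""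
--     # Stream the rows once, maintaining running per-column sums and products;
--     # zip truncates both accumulators to the shortest row seen so far.
--     sums = None
--     prods = None
--     for row in parts:
--         if sums is None:
--             sums = list(row)
--             prods = list(row)
--         else:
--             sums = [a + b for a, b in zip(sums, row)]
--             prods = [a * b for a, b in zip(prods, row)]
--     if sums is None:
--         return 0
--     total = 0
--     for i, s in enumerate(sums):
--         total += s if ops[i] == "+" else prods[i]
--     return total
-- ===== Notes on version B (the rewrite author's own statement) =====
-- stated objective: alternative
-- what changed: B replaces the transpose-then-reduce-each-column strategy by a single row-major streaming pass that maintains running per-column sum and product accumulator vectors (truncated by zip to the shortest row), selecting sum or product per column only at the end.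
import Mathlib
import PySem

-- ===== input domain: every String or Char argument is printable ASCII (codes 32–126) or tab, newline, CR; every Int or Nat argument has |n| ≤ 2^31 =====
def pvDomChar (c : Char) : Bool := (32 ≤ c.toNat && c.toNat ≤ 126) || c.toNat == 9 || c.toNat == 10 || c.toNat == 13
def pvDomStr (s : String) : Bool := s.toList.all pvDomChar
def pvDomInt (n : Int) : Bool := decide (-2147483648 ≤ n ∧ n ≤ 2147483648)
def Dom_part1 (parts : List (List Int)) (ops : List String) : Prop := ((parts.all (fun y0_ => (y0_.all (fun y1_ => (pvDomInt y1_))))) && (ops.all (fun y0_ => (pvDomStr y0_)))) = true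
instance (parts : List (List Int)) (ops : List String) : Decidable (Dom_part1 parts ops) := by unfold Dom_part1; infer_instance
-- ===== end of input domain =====

-- B streams the rows once, maintaining running per-column sum and product accumulator
-- vectors (zip-truncated to the shortest row), instead of transposing and reducing columns.

-- ===== PORT A =====
-- port of the builtin zip(*rows): repeatedly take the heads while every row is nonempty
-- (exact model of zip's truncation to the shortest row)
def pyZipStar (rows : List (List Int)) : List (List Int) :=
  if h : rows ≠ [] ∧ rows.all (fun r => !r.isEmpty) then
    rows.map (fun r => r.headD 0) :: pyZipStar (rows.map List.tail)
  else []
termination_by (rows.headD []).length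
decreasing_by
  obtain ⟨hne, hall⟩ := h
  match rows with
  | r :: rs =>
    have hr : ¬ r.isEmpty := by simpa using (List.all_eq_true.mp hall r (by simp))
    simp only [List.map_cons, List.headD_cons]
    cases r with
    | nil => simp at hr
    | cons x xs => simp

def part1 (parts : List (List Int)) (ops : List String) : Int :=
  let t := pyZipStar parts
  (PySem.List.enumerate t 0).foldl (fun total p =>
    if PySem.List.pyGetD ops p.1 "" = "+" then
      total + p.2.sum
    else
      -- reduce(lambda x, y: x * y, part); the [] case never occurs (columns are nonempty)
      total + (match p.2 with | [] => 0 | h :: tl => tl.foldl (· * ·) h)) 0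

-- ===== PORT B =====
def part1_alt (parts : List (List Int)) (ops : List String) : Int :=
  let st : Option (List Int × List Int) := parts.foldl (fun st row =>
    match st with
    | none => some (row, row)
    | some (s, p) => some (List.zipWith (· + ·) s row, List.zipWith (· * ·) p row)) none
  match st with
  | none => 0
  | some (s, p) =>
    (PySem.List.enumerate s 0).foldl (fun total q =>
      total + (if PySem.List.pyGetD ops q.1 "" = "+" then q.2 else PySem.List.pyGetD p q.1 0)) 0

-- ===== PRECONDITION & SPEC =====
-- A raises IndexError on ops[i] when ops is shorter than the number of columns; exactly those inputs are excluded.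
def Pre_part1 (parts : List (List Int)) (ops : List String) : Prop :=
  ((parts.map List.length).min?).getD 0 ≤ ops.length
instance (parts : List (List Int)) (ops : List String) : Decidable (Pre_part1 parts ops) := by unfold Pre_part1; infer_instance
def pvWitness_part1 : List (List Int) × List String := ([[1, 2], [3, 4]], ["+", "*"])

def Spec_part1 (parts : List (List Int)) (ops : List String) (out : Int) : Prop := out = part1_alt parts ops
instance (parts : List (List Int)) (ops : List String) (out : Int) : Decidable (Spec_part1 parts ops out) := by unfold Spec_part1; infer_instance

-- ===== CLAIM (what is proved, stated in full; the proofs are below) =====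
def Claim_equal_part1 : Prop := ∀ (parts : List (List Int)) (ops : List String), Dom_part1 parts ops → Pre_part1 parts ops → Spec_part1 parts ops (part1 parts ops)

-- ===== LEMMAS AND PROOFS =====

-- number of columns = minimum row length (0 for no rows)
def pvNcols (parts : List (List Int)) : Nat := ((parts.map List.length).min?).getD 0

lemma foldl_min_map_sub (t : List Nat) (x : Nat) :
    (t.map (fun a => a - 1)).foldl min (x - 1) = t.foldl min x - 1 := by
  induction t generalizing x with
  | nil => rfl
  | cons a t ih =>
    simp only [List.map_cons, List.foldl_cons]
    rw [← ih]
    congr 1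
    simp only [Nat.min_def]
    split_ifs <;> omega

lemma one_le_foldl_min (t : List Nat) (x : Nat) (hx : 1 ≤ x)
    (ht : ∀ a ∈ t, 1 ≤ a) : 1 ≤ t.foldl min x := by
  induction t generalizing x with
  | nil => exact hx
  | cons a t ih =>
    simp only [List.foldl_cons]
    exact ih _ (le_min hx (ht a (by simp))) (fun b hb => ht b (by simp [hb]))

lemma pvNcols_tail (rows : List (List Int)) (hne : rows ≠ [])
    (hall : (rows.all (fun r => !r.isEmpty)) = true) :
    pvNcols rows = pvNcols (rows.map List.tail) + 1 := by
  match rows with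
  | r :: rs =>
    have hall' : ∀ s ∈ r :: rs, s ≠ [] := by
      intro s hs
      have := List.all_eq_true.mp hall s hs
      simpa using this
    unfold pvNcols
    have hmap : ((r :: rs).map List.tail).map List.length
        = ((r :: rs).map List.length).map (fun a => a - 1) := by
      simp only [List.map_map]
      apply List.map_congr_left
      intro s hs
      simp [List.length_tail]
    rw [hmap]
    simp only [List.map_cons, List.min?_cons', Option.getD_some]
    rw [foldl_min_map_sub]
    have h1 : 1 ≤ (rs.map List.length).foldl min r.length := by
      apply one_le_foldl_min
      · have := hall' r (by simp); cases r <;> simp_all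
      · intro a ha
        obtain ⟨s, hs, rfl⟩ := List.mem_map.mp ha
        have := hall' s (by simp [hs]); cases s <;> simp_all
    omega

-- characterization of pyZipStar
lemma pyZipStar_eq (rows : List (List Int)) :
    pyZipStar rows = (List.range (pvNcols rows)).map
      (fun i => rows.map (fun r => r.getD i 0)) := by
  fun_induction pyZipStar rows with
  | case1 rows h ih =>
    obtain ⟨hne, hall⟩ := h
    simp at ih
    have hall' : ∀ s ∈ rows, s ≠ [] := by
      intro s hs
      have := List.all_eq_true.mp hall s hs
      simpa using this
    rw [pvNcols_tail rows hne hall, List.range_succ_eq_map, List.map_cons, ih]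
    congr 1
    · apply List.map_congr_left
      intro s hs
      cases s with
      | nil => exact absurd rfl (hall' _ hs)
      | cons a t => rfl
    · rw [List.map_map]
      apply List.map_congr_left
      intro i _
      simp only [Function.comp]
      apply List.map_congr_left
      intro s hs
      cases s with
      | nil => exact absurd rfl (hall' _ hs)
      | cons a t => simp [List.getD]
  | case2 rows h =>
    suffices hz : pvNcols rows = 0 by simp [hz]
    rcases rows with _ | ⟨r, rs⟩
    · simp [pvNcols]
    · have hex : ∃ s ∈ r :: rs, s.isEmpty = true := by
        by_contra hc
        push_neg at hc
        exact h ⟨by simp, List.all_eq_true.mpr (fun s hs => by simpa using hc s hs)⟩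
      obtain ⟨s, hs, hse⟩ := hex
      have h0 : (0 : Nat) ∈ (r :: rs).map List.length := by
        refine List.mem_map.mpr ⟨s, hs, ?_⟩
        cases s <;> simp_all
      unfold pvNcols
      rcases hm : ((r :: rs).map List.length).min? with _ | m
      · simp
      · have := (List.min?_eq_some_iff.mp hm).2 0 h0
        simpa using this

lemma foldl_enumerate_map {α β : Type} (l : List α) (c : α → β) (s : Int)
    (F : Int → Int × β → Int) (a : Int) :
    (PySem.List.enumerate (l.map c) s).foldl F a
      = (PySem.List.enumerate l s).foldl (fun acc p => F acc (p.1, c p.2)) a := by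
  induction l generalizing s a with
  | nil => rfl
  | cons x t ih =>
    simp only [List.map_cons, PySem.List.enumerate_cons, List.foldl_cons]
    exact ih (s + 1) (F a (s, c x))

lemma enumerate_range (n : Nat) :
    PySem.List.enumerate (List.range n) 0 = (List.range n).map (fun (i : Nat) => ((i : Int), i)) := by
  apply List.ext_getElem
  · simp [PySem.List.length_enumerate]
  · intro k h1 h2
    rw [PySem.List.getElem_enumerate, List.getElem_map]
    simp [List.getElem_range]

-- an enumerate-fold over any list is a range-fold over its indices and getD values
lemma foldl_enumerate_getD (l : List Int) (F : Int → Int × Int → Int) (a : Int) :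
    (PySem.List.enumerate l 0).foldl F a
      = (List.range l.length).foldl (fun acc (i : Nat) => F acc ((i : Int), l.getD i 0)) a := by
  have hl : l = (List.range l.length).map (fun i => l.getD i 0) := by
    apply List.ext_getElem
    · simp
    · intro k h1 h2
      simp [List.getD_eq_getElem?_getD, List.getElem?_eq_getElem h1]
  conv_lhs => rw [hl]
  rw [foldl_enumerate_map, enumerate_range, List.foldl_map]

-- B's streaming fold, component-wise
lemma stream_eq (rs : List (List Int)) (s p : List Int) :
    rs.foldl (fun st row =>
      match st with
      | none => some (row, row)
      | some (s, p) => some (List.zipWith (· + ·) s row, List.zipWith (· * ·) p row))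
      (some (s, p))
    = some (rs.foldl (fun a row => List.zipWith (· + ·) a row) s,
            rs.foldl (fun a row => List.zipWith (· * ·) a row) p) := by
  induction rs generalizing s p with
  | nil => rfl
  | cons r rs ih => simp only [List.foldl_cons]; exact ih _ _

lemma foldl_min_le (t : List Nat) (x : Nat) : t.foldl min x ≤ x := by
  induction t generalizing x with
  | nil => simp
  | cons a t ih => exact le_trans (ih _) (min_le_left _ _)

lemma zfold_length (f : Int → Int → Int) (rs : List (List Int)) (acc : List Int) :
    (rs.foldl (fun a row => List.zipWith f a row) acc).length
      = (rs.map List.length).foldl min acc.length := by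
  induction rs generalizing acc with
  | nil => rfl
  | cons r rs ih =>
    simp only [List.foldl_cons, List.map_cons]
    rw [ih, List.length_zipWith]

lemma zfold_getD (f : Int → Int → Int) (rs : List (List Int)) (acc : List Int) (i : Nat)
    (hi : i < (rs.foldl (fun a row => List.zipWith f a row) acc).length) :
    (rs.foldl (fun a row => List.zipWith f a row) acc).getD i 0
      = rs.foldl (fun a row => f a (row.getD i 0)) (acc.getD i 0) := by
  induction rs generalizing acc with
  | nil => rfl
  | cons r rs ih =>
    simp only [List.foldl_cons] at hi ⊢
    have hlen : i < (List.zipWith f acc r).length := by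
      have := foldl_min_le (rs.map List.length) (List.zipWith f acc r).length
      rw [zfold_length] at hi
      omega
    rw [ih _ hi]
    congr 1
    rw [List.length_zipWith] at hlen
    rw [List.getD_eq_getElem _ _ (by rw [List.length_zipWith]; omega),
        List.getElem_zipWith,
        List.getD_eq_getElem _ _ (by omega), List.getD_eq_getElem _ _ (by omega)]

lemma foldl_plus_sum (rs : List (List Int)) (i : Nat) (x : Int) :
    rs.foldl (fun a row => a + row.getD i 0) x = x + (rs.map (fun r => r.getD i 0)).sum := by
  induction rs generalizing x with
  | nil => simp
  | cons r rs ih => simp only [List.foldl_cons, List.map_cons, List.sum_cons]; rw [ih]; ring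

theorem part1_eq_alt (parts : List (List Int)) (ops : List String) :
    part1 parts ops = part1_alt parts ops := by
  rcases parts with _ | ⟨r, rs⟩
  · simp [part1, part1_alt, pyZipStar]
  · have hst : (r :: rs).foldl (fun st row =>
        match st with
        | none => some (row, row)
        | some (s, p) => some (List.zipWith (· + ·) s row, List.zipWith (· * ·) p row))
        none
      = some (rs.foldl (fun a row => List.zipWith (· + ·) a row) r,
              rs.foldl (fun a row => List.zipWith (· * ·) a row) r) := by
      simp only [List.foldl_cons]
      exact stream_eq rs r r
    simp only [part1, part1_alt, hst]
    set S := rs.foldl (fun a row => List.zipWith (· + ·) a row) r with hS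
    set P := rs.foldl (fun a row => List.zipWith (· * ·) a row) r with hP
    have hSlen : S.length = pvNcols (r :: rs) := by
      rw [hS, zfold_length]
      unfold pvNcols
      simp only [List.map_cons, List.min?_cons', Option.getD_some]
    have hPlen : P.length = pvNcols (r :: rs) := by
      rw [hP, zfold_length]
      unfold pvNcols
      simp only [List.map_cons, List.min?_cons', Option.getD_some]
    rw [pyZipStar_eq, foldl_enumerate_map, enumerate_range, List.foldl_map,
        foldl_enumerate_getD, hSlen]
    apply PySem.List.foldl_congr_mem
    intro a i hi
    have hin : i < pvNcols (r :: rs) := List.mem_range.mp hi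
    simp only [PySem.List.pyGetD_natCast]
    split_ifs with hop
    · rw [hS, zfold_getD _ _ _ _ (by rw [← hS]; omega), foldl_plus_sum]
      simp
    · have hPi : P.getD i 0 = (rs.map (fun row => row.getD i 0)).foldl (· * ·) (r.getD i 0) := by
        rw [hP, zfold_getD _ _ _ _ (by rw [← hP]; omega), List.foldl_map]
      rw [hPi]
      simp

-- ===== VERDICT (by name: the statement is the Claim_ definition above) =====
theorem part1_spec : Claim_equal_part1 := by
  intro parts ops _ _
  unfold Spec_part1
  exact part1_eq_alt parts ops
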